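-- pv_equiv track=rewrite | github.com/afras23/data-enrichment-pipeline | app/services/html_extraction.py | _classify_nav_link
-- ===== SOURCE A (Python) =====
-- def _classify_nav_link(path: str) -> str | None:
--     p = path.lower()
--     if any(x in p for x in ("/about", "about-us", "our-story")):
--         return "about"
--     if any(x in p for x in ("/contact", "contact-us", "get-in-touch")):
--         return "contact"
--     if any(x in p for x in ("/career", "jobs", "hiring")):
--         return "careers"
--     if "privacy" in p or "policy" in p:
--         return "privacy"
--     return None
-- ===== SOURCE B (Python) =====
-- _KW_PRIORITY = {
--     "/about": 0, "about-us": 0, "our-story": 0,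
--     "/contact": 1, "contact-us": 1, "get-in-touch": 1,
--     "/career": 2, "jobs": 2, "hiring": 2,
--     "privacy": 3, "policy": 3,
-- }
-- _LABELS = ["about", "contact", "careers", "privacy"]
--
--
-- def _classify_nav_link(path: str) -> str | None:
--     p = path.lower()
--     hits = [pri for kw, pri in _KW_PRIORITY.items() if kw in p]
--     return _LABELS[min(hits)] if hits else None
-- ===== Notes on version B (the rewrite author's own statement) =====
-- stated objective: alternative
-- what changed: Instead of four ordered early-return branches, B maps every keyword to a category priority in one flat dict, collects the priorities of ALL keywords occurring in the path, and returns the label of the minimum priority (none if no hit); correctness relies on min-priority equalling first-matching-branch.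
import Mathlib
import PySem

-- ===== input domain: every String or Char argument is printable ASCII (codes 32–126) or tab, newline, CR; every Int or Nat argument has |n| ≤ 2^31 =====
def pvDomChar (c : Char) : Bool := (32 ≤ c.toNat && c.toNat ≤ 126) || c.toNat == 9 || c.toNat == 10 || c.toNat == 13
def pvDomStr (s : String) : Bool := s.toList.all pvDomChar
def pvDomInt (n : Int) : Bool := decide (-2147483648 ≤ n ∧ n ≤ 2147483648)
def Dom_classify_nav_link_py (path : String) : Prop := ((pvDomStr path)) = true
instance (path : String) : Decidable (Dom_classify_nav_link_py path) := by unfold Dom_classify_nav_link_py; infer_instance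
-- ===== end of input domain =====

-- B replaces the four ordered early-return branches by a flat keyword→priority map: it collects
-- the priorities of ALL keywords occurring in the path and returns the label of the minimum (alternative; same cost).
-- ===== PORT A =====
def classify_nav_link_py (path : String) : Option String :=
  let p := PySem.Str.lower path
  if ["/about", "about-us", "our-story"].any (fun x => PySem.Str.isIn x p) then
    some "about"
  else if ["/contact", "contact-us", "get-in-touch"].any (fun x => PySem.Str.isIn x p) then
    some "contact"
  else if ["/career", "jobs", "hiring"].any (fun x => PySem.Str.isIn x p) then
    some "careers"
  else if PySem.Str.isIn "privacy" p || PySem.Str.isIn "policy" p then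
    some "privacy"
  else
    none

-- ===== PORT B =====
-- the flat keyword → priority dict of Source B (insertion order)
def kwPriority : List (String × Int) :=
  [("/about", 0), ("about-us", 0), ("our-story", 0),
   ("/contact", 1), ("contact-us", 1), ("get-in-touch", 1),
   ("/career", 2), ("jobs", 2), ("hiring", 2),
   ("privacy", 3), ("policy", 3)]

def navLabels : List String := ["about", "contact", "careers", "privacy"]

def classify_nav_link_py_alt (path : String) : Option String :=
  let p := PySem.Str.lower path
  -- hits = [pri for kw, pri in _KW_PRIORITY.items() if kw in p]
  let hits := (kwPriority.filter (fun kv => PySem.Str.isIn kv.1 p)).map Prod.snd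
  -- return _LABELS[min(hits)] if hits else None
  match PySem.List.min? hits (fun x => x) with
  | some m => PySem.List.pyGet? navLabels m
  | none => none

-- ===== PRECONDITION & SPEC =====
def Spec_classify_nav_link_py (path : String) (out : Option String) : Prop := out = classify_nav_link_py_alt path
instance (path : String) (out : Option String) : Decidable (Spec_classify_nav_link_py path out) := by unfold Spec_classify_nav_link_py; infer_instance

-- ===== CLAIM (what is proved, stated in full; the proofs are below) =====
def Claim_equal_classify_nav_link_py : Prop := ∀ (path : String), Dom_classify_nav_link_py path → Spec_classify_nav_link_py path (classify_nav_link_py path)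

-- ===== LEMMAS AND PROOFS =====

-- ===== VERDICT (by name: the statement is the Claim_ definition above) =====
set_option maxHeartbeats 2000000 in
theorem classify_nav_link_py_spec : Claim_equal_classify_nav_link_py := by
  intro path _
  unfold Spec_classify_nav_link_py classify_nav_link_py classify_nav_link_py_alt kwPriority navLabels
  simp only [List.any_cons, List.any_nil, Bool.or_false, List.filter_cons, List.filter_nil]
  generalize PySem.Str.isIn "/about" (PySem.Str.lower path) = b1
  generalize PySem.Str.isIn "about-us" (PySem.Str.lower path) = b2
  generalize PySem.Str.isIn "our-story" (PySem.Str.lower path) = b3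
  generalize PySem.Str.isIn "/contact" (PySem.Str.lower path) = b4
  generalize PySem.Str.isIn "contact-us" (PySem.Str.lower path) = b5
  generalize PySem.Str.isIn "get-in-touch" (PySem.Str.lower path) = b6
  generalize PySem.Str.isIn "/career" (PySem.Str.lower path) = b7
  generalize PySem.Str.isIn "jobs" (PySem.Str.lower path) = b8
  generalize PySem.Str.isIn "hiring" (PySem.Str.lower path) = b9
  generalize PySem.Str.isIn "privacy" (PySem.Str.lower path) = b10
  generalize PySem.Str.isIn "policy" (PySem.Str.lower path) = b11
  revert b1 b2 b3 b4 b5 b6 b7 b8 b9 b10 b11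
  decide
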